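-- pv_equiv track=rewrite | github.com/Abderrahim-Fezouati/KG-Validation-for-Multihop-QA-in-biomedical-field | scripts/03_analyze_queries_sapbert.py | spans_in_text
-- ===== SOURCE A (Python) =====
-- def spans_in_text(cuis, surface_map, text):
--     # returns list of (cui, start_index) by earliest surface occurrence
--     hits = []
--     for surf, cui in surface_map:
--         i = text.find(surf)
--         if i >= 0:
--             hits.append((cui, i))
--     hits.sort(key=lambda x: x[1])
--     # deduplicate by cui preserving order
--     seen = set(); out=[]
--     for cui, pos in hits:
--         if cui not in seen:
--             seen.add(cui); out.append(cui)
--     return out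
-- ===== SOURCE B (Python) =====
-- def spans_in_text(cuis, surface_map, text):
--     # alternative: left-to-right position sweep; each occurring surface is emitted
--     # at its first match, so results come out already in position order
--     pending = [(surf, cui) for surf, cui in surface_map if surf in text]
--     ordered = []
--     for i in range(len(text) + 1):
--         if not pending:
--             break
--         rest = []
--         for surf, cui in pending:
--             if text.startswith(surf, i):
--                 ordered.append(cui)
--             else:
--                 rest.append((surf, cui))
--         pending = rest
--     return list(dict.fromkeys(ordered))
-- ===== Notes on version B (the rewrite author's own statement) =====
-- stated objective: alternative
-- what changed: Replaces per-surface find + stable sort by position with a single left-to-right sweep over text positions that emits each still-pending occurring surface at its first match (so results come out already in position order, ties in map order) and dedups with dict.fromkeys.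
import Mathlib
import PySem

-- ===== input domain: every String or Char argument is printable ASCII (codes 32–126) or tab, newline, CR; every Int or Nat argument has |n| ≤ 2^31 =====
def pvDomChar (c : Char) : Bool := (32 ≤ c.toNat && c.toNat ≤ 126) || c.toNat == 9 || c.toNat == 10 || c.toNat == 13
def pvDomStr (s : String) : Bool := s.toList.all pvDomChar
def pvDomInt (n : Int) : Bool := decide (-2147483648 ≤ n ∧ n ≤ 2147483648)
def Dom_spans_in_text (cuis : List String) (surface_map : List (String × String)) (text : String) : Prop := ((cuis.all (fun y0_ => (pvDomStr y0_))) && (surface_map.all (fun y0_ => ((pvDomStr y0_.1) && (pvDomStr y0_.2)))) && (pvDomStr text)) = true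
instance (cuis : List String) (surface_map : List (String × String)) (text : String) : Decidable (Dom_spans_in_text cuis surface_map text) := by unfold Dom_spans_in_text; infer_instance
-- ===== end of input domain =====

-- B replaces find-per-surface + stable sort with a left-to-right sweep over positions (alternative decomposition, not claimed faster).

-- ===== PORT A =====
def spans_in_text (cuis : List String) (surface_map : List (String × String)) (text : String) : List String :=
  let hits : List (String × Int) := surface_map.foldl
    (fun acc sc =>
      let i := PySem.Str.find text sc.1
      if 0 ≤ i then acc ++ [(sc.2, i)] else acc) []
  let sortedHits := PySem.List.sorted hits (fun x => x.2)
  (sortedHits.foldl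
    (fun (st : PySem.Set String × List String) q =>
      if PySem.Set.contains st.1 q.1 then st
      else (PySem.Set.add st.1 q.1, st.2 ++ [q.1])) (PySem.Set.empty, [])).2

-- ===== PORT B =====
-- Python's text.startswith(surf, i) for 0 ≤ i ≤ len(text) is exactly: surf.toList is a prefix of text.toList.drop i.
def pvSweep (t : List Char) : Nat → Nat → List (String × String) → List String
  | _, 0, _ => []
  | i, fuel+1, pending =>
    if pending.isEmpty then []
    else
      (pending.filter (fun sc => PySem.Chars.startswith (t.drop i) sc.1.toList)).map (·.2)
        ++ pvSweep t (i+1) fuel (pending.filter (fun sc => !PySem.Chars.startswith (t.drop i) sc.1.toList))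

def spans_in_text_alt (cuis : List String) (surface_map : List (String × String)) (text : String) : List String :=
  PySem.List.dedup (pvSweep text.toList 0 (text.toList.length + 1)
    (surface_map.filter (fun sc => PySem.Str.isIn sc.1 text)))

-- ===== PRECONDITION & SPEC =====
def Spec_spans_in_text (cuis : List String) (surface_map : List (String × String)) (text : String) (out : List String) : Prop := out = spans_in_text_alt cuis surface_map text
instance (cuis : List String) (surface_map : List (String × String)) (text : String) (out : List String) : Decidable (Spec_spans_in_text cuis surface_map text out) := by unfold Spec_spans_in_text; infer_instance

-- ===== CLAIM (what is proved, stated in full; the proofs are below) =====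
def Claim_equal_spans_in_text : Prop := ∀ (cuis : List String) (surface_map : List (String × String)) (text : String), Dom_spans_in_text cuis surface_map text → Spec_spans_in_text cuis surface_map text (spans_in_text cuis surface_map text)

-- ===== LEMMAS AND PROOFS =====

-- find t s = j  ↔  s first occurs in t exactly at position j
theorem pv_find_eq_coe_iff (t s : List Char) (j : Nat) :
    PySem.Chars.find t s = (j : Int) ↔ (s <+: t.drop j ∧ ∀ i < j, ¬ s <+: t.drop i) := by
  constructor
  · intro h
    have h0 : (0:Int) ≤ PySem.Chars.find t s := by rw [h]; exact Int.natCast_nonneg j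
    obtain ⟨hp, hm⟩ := PySem.Chars.find_spec h0
    have hj : (PySem.Chars.find t s).toNat = j := by omega
    rw [hj] at hp hm
    exact ⟨hp, hm⟩
  · rintro ⟨hj, hmin⟩
    have h0 : (0:Int) ≤ PySem.Chars.find t s := by
      rw [PySem.Chars.find_nonneg_iff]
      exact hj.isInfix.trans (List.drop_suffix j t).isInfix
    obtain ⟨hp, hm⟩ := PySem.Chars.find_spec h0
    have : (PySem.Chars.find t s).toNat = j := by
      by_contra hne
      rcases Nat.lt_or_ge (PySem.Chars.find t s).toNat j with hlt | hge
      · exact hmin _ hlt hp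
      · exact hm j (by omega) hj
    omega

-- insertBy places x after all non-'before' elements and in front of all 'before' ones
theorem pv_insertBy_split {α : Type} (before : α → α → Bool) (x : α) :
    ∀ (ws zs : List α), (∀ w ∈ ws, before x w = false) → (∀ z ∈ zs, before x z = true) →
      PySem.List.insertBy before x (ws ++ zs) = ws ++ x :: zs := by
  intro ws
  induction ws with
  | nil =>
    intro zs _ hz
    cases zs with
    | nil => simp [PySem.List.insertBy]
    | cons z zs => simp [PySem.List.insertBy, hz z (by simp)]
  | cons w ws ih =>
    intro zs hw hz
    have hwf : before x w = false := hw w (by simp)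
    simp only [List.cons_append, PySem.List.insertBy, hwf]
    simp [ih zs (fun a ha => hw a (by simp [ha])) hz]

def pvBlocks (n : Nat) (xs : List (String × Int)) : List (String × Int) :=
  (List.range (n+1)).flatMap (fun j => xs.filter (fun p => p.2 == ((j : Nat) : Int)))

-- stable sort by position = concatenation of the per-position blocks, in position order
theorem pv_sorted_eq_blocks (n : Nat) :
    ∀ xs : List (String × Int), (∀ p ∈ xs, ∃ k : Nat, k ≤ n ∧ p.2 = (k : Int)) →
      PySem.List.sorted xs (fun x => x.2) = pvBlocks n xs := by
  intro xs
  induction xs using List.reverseRecOn with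
  | nil => intro _; simp [pvBlocks, PySem.List.sorted_eq_foldl_insertBy]
  | append_singleton ys p ih =>
    intro h
    obtain ⟨k, hk, hpk⟩ := h p (by simp)
    have hys : ∀ q ∈ ys, ∃ k : Nat, k ≤ n ∧ q.2 = (k : Int) :=
      fun q hq => h q (by simp [hq])
    have hfold : PySem.List.sorted (ys ++ [p]) (fun x => x.2)
        = PySem.List.insertBy (fun a b => decide (a.2 < b.2)) p (PySem.List.sorted ys (fun x => x.2)) := by
      rw [PySem.List.sorted_eq_foldl_insertBy, PySem.List.sorted_eq_foldl_insertBy,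
        List.foldl_append]
      rfl
    rw [hfold, ih hys]
    -- split the blocks of ys at position k
    have hsplit : List.range (n+1) = List.range (k+1) ++ List.range' (k+1) (n-k) := by
      rw [List.range_eq_range']
      have h2 : n + 1 = (k+1) + (n-k) := by omega
      rw [h2, ← List.range'_append (s := 0) (m := k+1) (n := n-k) (step := 1)]
      simp [List.range_eq_range']
    set f : Nat → List (String × Int) := fun j => ys.filter (fun p => p.2 == ((j : Nat) : Int)) with hf
    set g : Nat → List (String × Int) := fun j => (ys ++ [p]).filter (fun p => p.2 == ((j : Nat) : Int)) with hg
    have hblocks_ys : pvBlocks n ys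
        = (List.range (k+1)).flatMap f ++ (List.range' (k+1) (n-k)).flatMap f := by
      rw [pvBlocks, hsplit, List.flatMap_append]
    have hins : PySem.List.insertBy (fun a b => decide (a.2 < b.2)) p (pvBlocks n ys)
        = (List.range (k+1)).flatMap f ++ p :: (List.range' (k+1) (n-k)).flatMap f := by
      rw [hblocks_ys]
      apply pv_insertBy_split
      · intro w hw
        rcases List.mem_flatMap.mp hw with ⟨j, hj, hwj⟩
        have hj' : j < k + 1 := List.mem_range.mp hj
        have hw2 : w.2 = (j : Int) := by
          have := (List.mem_filter.mp hwj).2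
          exact eq_of_beq this
        simp only [decide_eq_false_iff_not, not_lt, hpk, hw2]
        omega
      · intro z hz
        rcases List.mem_flatMap.mp hz with ⟨j, hj, hzj⟩
        rcases List.mem_range'.mp hj with ⟨i, _, hji⟩
        have hz2 : z.2 = (j : Int) := eq_of_beq (List.mem_filter.mp hzj).2
        simp only [decide_eq_true_eq, hpk, hz2]
        omega
    rw [hins]
    -- now compute pvBlocks n (ys ++ [p])
    have hgk : ∀ j : Nat, g j = if j = k then f j ++ [p] else f j := by
      intro j
      by_cases hjk : j = k
      · subst hjk
        simp only [hg, hf, List.filter_append]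
        congr 1
        simp [hpk]
      · simp only [hg, hf, List.filter_append, if_neg hjk]
        have hfalse : (p.2 == ((j:Nat) : Int)) = false := by
          simp [hpk]
          omega
        simp [hfalse]
    have h1 : (List.range (k+1)).flatMap g = (List.range (k+1)).flatMap f ++ [p] := by
      rw [List.range_succ, List.flatMap_append, List.flatMap_append]
      have hlt : (List.range k).flatMap g = (List.range k).flatMap f := by
        apply List.flatMap_congr
        intro j hj
        have : j ≠ k := by have := List.mem_range.mp hj; omega
        rw [hgk j, if_neg this]
      rw [hlt]
      simp [hgk k]
    have h2 : (List.range' (k+1) (n-k)).flatMap g = (List.range' (k+1) (n-k)).flatMap f := by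
      apply List.flatMap_congr
      intro j hj
      rcases List.mem_range'.mp hj with ⟨i, _, hji⟩
      have : j ≠ k := by omega
      rw [hgk j, if_neg this]
    rw [pvBlocks, hsplit, List.flatMap_append, h1, h2, List.append_assoc]
    rfl

-- A's first loop builds the (cui, find) pairs of the surfaces that occur
theorem pv_hits_eq (text : String) :
    ∀ (l : List (String × String)) (acc : List (String × Int)),
      l.foldl (fun acc sc =>
        let i := PySem.Str.find text sc.1
        if 0 ≤ i then acc ++ [(sc.2, i)] else acc) acc
      = acc ++ (l.filter (fun sc => 0 ≤ PySem.Str.find text sc.1)).map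
          (fun sc => (sc.2, PySem.Str.find text sc.1)) := by
  intro l
  induction l with
  | nil => simp
  | cons sc l ih =>
    intro acc
    by_cases h : (0:Int) ≤ PySem.Str.find text sc.1
    · simp only [List.foldl_cons, if_pos h]
      rw [ih]
      rw [PySem.Str.find_eq] at h
      simp [h]
    · simp only [List.foldl_cons, if_neg h]
      rw [ih]
      rw [PySem.Str.find_eq] at h
      simp [h]

-- A's dedup loop with a twin (seen, out) state is Set.ofList on the cuis
theorem pv_dedup_fold :
    ∀ (l : List (String × Int)) (s : List String),
      l.foldl (fun (st : PySem.Set String × List String) q =>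
        if PySem.Set.contains st.1 q.1 then st
        else (PySem.Set.add st.1 q.1, st.2 ++ [q.1])) (s, s)
      = ((l.map (·.1)).foldl PySem.Set.add s, (l.map (·.1)).foldl PySem.Set.add s) := by
  intro l
  induction l with
  | nil => intro s; simp
  | cons q l ih =>
    intro s
    by_cases h : PySem.Set.contains s q.1
    · have hm : q.1 ∈ s := by simpa [PySem.Set.contains] using h
      have hadd : PySem.Set.add s q.1 = s := by simp [PySem.Set.add, PySem.Set.contains, hm]
      simp only [List.foldl_cons, if_pos h, List.map_cons, hadd]
      exact ih s
    · have hm : q.1 ∉ s := by simpa [PySem.Set.contains] using h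
      have hadd : PySem.Set.add s q.1 = s ++ [q.1] := by simp [PySem.Set.add, PySem.Set.contains, hm]
      simp only [List.foldl_cons, if_neg h, List.map_cons, hadd]
      exact ih (s ++ [q.1])

-- the sweep, from position i with fuel steps, emits each pending surface's cui at its first occurrence
theorem pv_sweep_eq (t : List Char) :
    ∀ (fuel i : Nat) (P : List (String × String)),
      (∀ sc ∈ P, ∀ j < i, ¬ sc.1.toList <+: t.drop j) →
      pvSweep t i fuel P
        = (List.range' i fuel).flatMap (fun j =>
            (P.filter (fun sc => PySem.Chars.find t sc.1.toList == ((j : Nat) : Int))).map (·.2)) := by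
  intro fuel
  induction fuel with
  | zero => intro i P _; simp [pvSweep]
  | succ fuel ih =>
    intro i P hinv
    by_cases hP : P = []
    · subst hP; simp [pvSweep]
    · have hPe : P.isEmpty = false := by simp [hP]
      rw [pvSweep, hPe]
      simp only [Bool.false_eq_true, if_false]
      have hmatch : P.filter (fun sc => PySem.Chars.startswith (t.drop i) sc.1.toList)
          = P.filter (fun sc => PySem.Chars.find t sc.1.toList == ((i : Nat) : Int)) := by
        apply List.filter_congr
        intro sc hsc
        rw [Bool.eq_iff_iff, PySem.Chars.startswith_iff, beq_iff_eq, pv_find_eq_coe_iff]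
        constructor
        · intro h; exact ⟨h, fun j hj => hinv sc hsc j hj⟩
        · exact fun h => h.1
      have hrestinv : ∀ sc ∈ P.filter (fun sc => !PySem.Chars.startswith (t.drop i) sc.1.toList),
          ∀ j < i + 1, ¬ sc.1.toList <+: t.drop j := by
        intro sc hsc j hj
        rcases List.mem_filter.mp hsc with ⟨hmem, hns⟩
        rcases Nat.lt_or_ge j i with hlt | hge
        · exact hinv sc hmem j hlt
        · have : j = i := by omega
          subst this
          intro hpre
          have := (PySem.Chars.startswith_iff (t.drop j) sc.1.toList).mpr hpre
          simp [this] at hns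
      rw [ih (i+1) _ hrestinv, List.range'_succ, List.flatMap_cons, hmatch]
      congr 1
      apply List.flatMap_congr
      intro j hj
      have hij : i + 1 ≤ j := by
        rcases List.mem_range'.mp hj with ⟨w, _, hw⟩
        omega
      rw [List.filter_filter]
      congr 1
      apply List.filter_congr
      intro sc hsc
      by_cases hfe : PySem.Chars.find t sc.1.toList = ((j : Nat) : Int)
      · have hmin := (pv_find_eq_coe_iff t sc.1.toList j).mp hfe
        have hns : ¬ sc.1.toList <+: t.drop i := hmin.2 i (by omega)
        have hsw : PySem.Chars.startswith (t.drop i) sc.1.toList = false := by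
          rw [← Bool.not_eq_true, PySem.Chars.startswith_iff]; exact hns
        simp only [hsw, Bool.not_false, Bool.and_true]
      · have hff : (PySem.Chars.find t sc.1.toList == ((j : Nat) : Int)) = false := by
          rw [beq_eq_false_iff_ne]; exact hfe
        simp only [hff, Bool.false_and]

-- ===== VERDICT (by name: the statement is the Claim_ definition above) =====
theorem spans_in_text_spec : Claim_equal_spans_in_text := by
  intro cuis surface_map text _
  unfold Spec_spans_in_text spans_in_text spans_in_text_alt
  set t := text.toList with ht
  set n := t.length with hn
  -- A side: hits as filter+map
  rw [pv_hits_eq]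
  simp only [List.nil_append]
  set hits : List (String × Int) :=
    (surface_map.filter (fun sc => 0 ≤ PySem.Str.find text sc.1)).map
      (fun sc => (sc.2, PySem.Str.find text sc.1)) with hhits
  have hbound : ∀ p ∈ hits, ∃ k : Nat, k ≤ n ∧ p.2 = (k : Int) := by
    intro p hp
    rcases List.mem_map.mp hp with ⟨sc, hsc, rfl⟩
    have h0 : (0:Int) ≤ PySem.Str.find text sc.1 := of_decide_eq_true (List.mem_filter.mp hsc).2
    have hle : PySem.Str.find text sc.1 ≤ (t.length : Int) := by
      rw [PySem.Str.find_eq, ← ht]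
      exact PySem.Chars.find_le_length t sc.1.toList
    exact ⟨(PySem.Str.find text sc.1).toNat, by omega, (Int.toNat_of_nonneg h0).symm⟩
  rw [pv_sorted_eq_blocks n hits hbound]
  have hemp : ((PySem.Set.empty : PySem.Set String), ([] : List String)) = (([] : List String), ([] : List String)) := rfl
  rw [hemp, pv_dedup_fold]
  -- reduce A's deduped list to the flatMap of cuis per first-occurrence position
  have hAlist : (pvBlocks n hits).map (·.1)
      = (List.range (n+1)).flatMap (fun j =>
          (surface_map.filter (fun sc => PySem.Chars.find t sc.1.toList == ((j : Nat) : Int))).map (·.2)) := by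
    rw [pvBlocks, List.map_flatMap]
    apply List.flatMap_congr
    intro j _
    rw [hhits, List.filter_map, List.filter_filter]
    have hfc : surface_map.filter
        (fun sc => ((fun (p : String × Int) => p.2 == ((j:Nat) : Int)) ∘
          (fun sc : String × String => (sc.2, PySem.Str.find text sc.1))) sc
            && decide (0 ≤ PySem.Str.find text sc.1))
        = surface_map.filter (fun sc => PySem.Chars.find t sc.1.toList == ((j : Nat) : Int)) := by
      apply List.filter_congr
      intro sc _
      simp only [Function.comp_apply, PySem.Str.find_eq, ← ht]
      by_cases hfe : PySem.Chars.find t sc.1.toList = ((j:Nat) : Int)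
      · have h0 : (0:Int) ≤ PySem.Chars.find t sc.1.toList := by
          rw [hfe]; exact Int.natCast_nonneg j
        simp [hfe]
      · simp [hfe]
    rw [hfc, List.map_map]
    rfl
  simp only [hAlist]
  -- B side: the sweep over the occurring surfaces
  rw [pv_sweep_eq t (n+1) 0 (surface_map.filter (fun sc => PySem.Str.isIn sc.1 text))
    (by intro sc _ j hj; omega)]
  have hpre : ∀ j : Nat,
      ((surface_map.filter (fun sc => PySem.Str.isIn sc.1 text)).filter
        (fun sc => PySem.Chars.find t sc.1.toList == ((j : Nat) : Int)))
      = surface_map.filter (fun sc => PySem.Chars.find t sc.1.toList == ((j : Nat) : Int)) := by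
    intro j
    rw [List.filter_filter]
    apply List.filter_congr
    intro sc _
    by_cases hfe : PySem.Chars.find t sc.1.toList = ((j : Nat) : Int)
    · have h0 : (0:Int) ≤ PySem.Chars.find t sc.1.toList := by
        rw [hfe]; exact Int.natCast_nonneg j
      have hin : PySem.Chars.isIn sc.1.toList text.toList = true := by
        rw [PySem.Chars.isIn_iff_infix, ← ht]
        exact (PySem.Chars.find_nonneg_iff t sc.1.toList).mp h0
      simp [hfe, hin]
    · have hff : (PySem.Chars.find t sc.1.toList == ((j : Nat) : Int)) = false := by
        rw [beq_eq_false_iff_ne]; exact hfe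
      simp [hff]
  have hflat : (List.range' 0 (n+1)).flatMap (fun j =>
        (((surface_map.filter (fun sc => PySem.Str.isIn sc.1 text)).filter
          (fun sc => PySem.Chars.find t sc.1.toList == ((j : Nat) : Int))).map (·.2)))
      = (List.range' 0 (n+1)).flatMap (fun j =>
        ((surface_map.filter (fun sc => PySem.Chars.find t sc.1.toList == ((j : Nat) : Int))).map (·.2))) :=
    List.flatMap_congr (fun j _ => by rw [hpre j])
  rw [PySem.List.dedup_eq_ofList, PySem.Set.ofList_eq_foldl, List.range_eq_range', hflat]
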